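-- pv_equiv track=rewrite | github.com/scrimshawlife-ctrl/Abraxas | abx/aalmanac_enrich.py | _co_terms
-- ===== SOURCE A (Python) =====
-- from collections import Counter
-- from typing import Any, Dict, List
--
-- def _co_terms(term: str, tokens: List[str], span: int = 6) -> Counter:
--     t = (term or "").lower().strip()
--     if not t or not tokens:
--         return Counter()
--     out = Counter()
--     if " " in t:
--         return out
--     for i, tok in enumerate(tokens):
--         if tok != t:
--             continue
--         lo = max(0, i - span)
--         hi = min(len(tokens), i + span + 1)
--         for j in range(lo, hi):
--             if j == i:
--                 continue
--             ct = tokens[j]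
--             if len(ct) < 3 or ct == t:
--                 continue
--             out[ct] += 1
--     return out
-- ===== SOURCE B (Python) =====
-- from collections import Counter
--
--
-- def _co_terms(term, tokens, span=6):
--     t = (term or "").lower().strip()
--     if not t or not tokens or " " in t:
--         return Counter()
--     # staged pipeline: occurrence index list of the term, then per-candidate counts
--     occ = [i for i, tok in enumerate(tokens) if tok == t]
--     pairs = [(ct, sum(1 for i in occ if j - span <= i <= j + span))
--              for j, ct in enumerate(tokens) if len(ct) >= 3 and ct != t]
--     out = Counter()
--     for ct, c in pairs:
--         if c != 0:
--             out[ct] += c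
--     return out
-- ===== Notes on version B (the rewrite author's own statement) =====
-- stated objective: alternative
-- what changed: Reverses the loop nesting and decomposition: instead of scanning a window around every occurrence of the term and incrementing one by one, B first collects the occurrence index list of the term, then builds (candidate, count) pairs in one comprehension over candidate tokens (counting nearby term occurrences from the index list), and finally folds the nonzero pairs into the Counter.
import Mathlib
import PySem

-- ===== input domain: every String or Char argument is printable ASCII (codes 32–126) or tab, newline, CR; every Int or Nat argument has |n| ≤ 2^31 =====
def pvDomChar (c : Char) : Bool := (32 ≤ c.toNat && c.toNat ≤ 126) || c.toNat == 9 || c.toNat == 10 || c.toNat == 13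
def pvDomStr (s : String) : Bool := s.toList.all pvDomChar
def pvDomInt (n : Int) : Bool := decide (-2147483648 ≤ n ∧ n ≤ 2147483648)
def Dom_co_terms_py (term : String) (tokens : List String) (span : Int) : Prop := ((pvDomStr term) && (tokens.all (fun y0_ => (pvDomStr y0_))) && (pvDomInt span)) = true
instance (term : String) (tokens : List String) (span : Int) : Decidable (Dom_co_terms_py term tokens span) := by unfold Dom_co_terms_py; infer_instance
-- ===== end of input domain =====

-- B replaces A's window-scan around each term occurrence by staged passes: an occurrence-index list of the term, a comprehension of (candidate, count) pairs, and a final fold of the nonzero pairs.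


-- ===== PORT A =====
-- ('term or ""' is 'term' itself for a string argument)
def co_terms_py (term : String) (tokens : List String) (span : Int) : List (String × Int) :=
  let t := PySem.Str.strip (PySem.Str.lower term)
  if t = "" ∨ tokens = [] then []
  else if PySem.Str.isIn " " t then []
  else
    let n : Int := PySem.List.len tokens
    let out := (PySem.List.enumerate tokens 0).foldl (fun out p =>
      if p.2 ≠ t then out
      else
        let lo := max 0 (p.1 - span)
        let hi := min n (p.1 + span + 1)
        (PySem.List.pyRange lo hi 1).foldl (fun out j =>
          if j = p.1 then out
          else
            let ct := PySem.List.pyGetD tokens j ""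
            if PySem.Str.len ct < 3 ∨ ct = t then out
            else out.modify ct 0 (· + 1)) out) PySem.Dict.empty
    out.items

-- ===== PORT B =====
-- ('sum(1 for i in occ if …)' is ported as the length of the filtered occurrence list)
def co_terms_py_alt (term : String) (tokens : List String) (span : Int) : List (String × Int) :=
  let t := PySem.Str.strip (PySem.Str.lower term)
  if t = "" ∨ tokens = [] ∨ PySem.Str.isIn " " t then []
  else
    let occ : List Int := (PySem.List.enumerate tokens 0).filterMap
      (fun p => if p.2 = t then some p.1 else none)
    let pairs : List (String × Int) := (PySem.List.enumerate tokens 0).filterMap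
      (fun p =>
        if 3 ≤ PySem.Str.len p.2 ∧ p.2 ≠ t then
          some (p.2, ((occ.filter
            (fun i => decide (p.1 - span ≤ i) && decide (i ≤ p.1 + span))).length : Int))
        else none)
    (pairs.foldl (fun out q => if q.2 ≠ 0 then out.modify q.1 0 (· + q.2) else out)
      PySem.Dict.empty).items

-- ===== PRECONDITION & SPEC =====
def Spec_co_terms_py (term : String) (tokens : List String) (span : Int) (out : List (String × Int)) : Prop := out = co_terms_py_alt term tokens span
instance (term : String) (tokens : List String) (span : Int) (out : List (String × Int)) : Decidable (Spec_co_terms_py term tokens span out) := by unfold Spec_co_terms_py; infer_instance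

-- ===== CLAIM (what is proved, stated in full; the proofs are below) =====
def Claim_equal_co_terms_py : Prop := ∀ (term : String) (tokens : List String) (span : Int), Dom_co_terms_py term tokens span → Spec_co_terms_py term tokens span (co_terms_py term tokens span)

-- ===== LEMMAS AND PROOFS =====

theorem pv_getD_foldl_modify_amount (l : List (String × Int)) (d : PySem.Dict String Int) (k : String) :
    (l.foldl (fun d p => d.modify p.1 0 (· + p.2)) d).getD k 0
      = d.getD k 0 + ((l.filter (fun p => p.1 == k)).map (·.2)).sum := by
  induction l generalizing d with
  | nil => simp
  | cons p ps ih =>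
    rw [List.foldl_cons, ih]
    by_cases hk : p.1 = k
    · simp [List.filter_cons, hk, PySem.Dict.getD_modify]
      ring
    · simp [List.filter_cons, hk, PySem.Dict.getD_modify, Ne.symm hk]

-- sum over a filter as a sum of ifs

theorem pv_sum_filter_ite {α : Type} (l : List α) (c : α → Bool) (F : α → Int) :
    ((l.filter c).map F).sum = (l.map (fun x => if c x then F x else 0)).sum := by
  induction l with
  | nil => rfl
  | cons x xs ih =>
    by_cases hc : c x = true
    · simp [List.filter_cons, hc, ih]
    · simp only [Bool.not_eq_true] at hc
      simp [List.filter_cons, hc, ih]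

-- a positivity conjunct in the filter may be dropped when non-positive values are 0

theorem pv_sum_filter_pos {α : Type} (l : List α) (c : α → Bool) (F : α → Int)
    (h : ∀ x ∈ l, ¬(0 < F x) → F x = 0) :
    ((l.filter (fun x => c x && decide (0 < F x))).map F).sum = ((l.filter c).map F).sum := by
  induction l with
  | nil => rfl
  | cons x xs ih =>
    have ih' := ih (fun y hy => h y (List.mem_cons_of_mem _ hy))
    by_cases hc : c x = true
    · by_cases hp : 0 < F x
      · simp [List.filter_cons, hc, hp, ih']
      · have h0 : F x = 0 := h x (List.mem_cons_self) hp
        simp [List.filter_cons, hc, hp, ih', h0]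
    · simp only [Bool.not_eq_true] at hc
      simp [List.filter_cons, hc, ih']

-- double counting: sum over rows = sum over columns

theorem pv_countswap (I J : List Int) (R : Int → Int → Bool) :
    (I.map (fun i => ((J.filter (fun j => R i j)).length : Int))).sum
      = (J.map (fun j => ((I.filter (fun i => R i j)).length : Int))).sum := by
  induction I with
  | nil => simp
  | cons i0 I' ih =>
    simp only [List.map_cons, List.sum_cons, ih]
    have : (J.map (fun j => (((i0 :: I').filter (fun i => R i j)).length : Int))).sum
        = (J.map (fun j => (if R i0 j then (1:Int) else 0) + ((I'.filter (fun i => R i j)).length : Int))).sum := by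
      apply congrArg
      apply List.map_congr_left
      intro j _
      by_cases hr : R i0 j = true
      · simp [hr]; omega
      · simp only [Bool.not_eq_true] at hr
        simp [hr]
    rw [this, List.sum_map_add]
    congr 1
    rw [PySem.List.sum_map_ite_one_zero (fun j => R i0 j) J]
    simp [List.countP_eq_length_filter]

def pvG (toks : List String) (j : Int) : String := PySem.List.pyGetD toks j ""

def pvGoodB (t : String) (toks : List String) (j : Int) : Bool :=
  !(decide (PySem.Str.len (pvG toks j) < 3) || (pvG toks j == t))

def pvWin (toks : List String) (span i : Int) : List Int :=
  PySem.List.pyRange (max 0 (i - span)) (min (PySem.List.len toks) (i + span + 1)) 1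

def pvCnt (t : String) (toks : List String) (span j : Int) : Int :=
  (((pvWin toks span j).filter (fun i => pvG toks i == t)).length : Int)

def pvEA (t : String) (toks : List String) (span : Int) : List String :=
  ((PySem.List.pyRange 0 (PySem.List.len toks) 1).filter (fun i => pvG toks i == t)).flatMap
    (fun i => ((pvWin toks span i).filter (fun j => !(j == i) && pvGoodB t toks j)).map (pvG toks))

def pvEB (t : String) (toks : List String) (span : Int) : List (String × Int) :=
  ((PySem.List.pyRange 0 (PySem.List.len toks) 1).filter
      (fun j => pvGoodB t toks j && decide (0 < pvCnt t toks span j))).map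
    (fun j => (pvG toks j, pvCnt t toks span j))

-- two strictly increasing Int lists with the same members are equal

theorem pv_eq_of_mem_iff_of_pairwise_lt (l₁ l₂ : List Int)
    (h1 : l₁.Pairwise (· < ·)) (h2 : l₂.Pairwise (· < ·))
    (hm : ∀ x, x ∈ l₁ ↔ x ∈ l₂) : l₁ = l₂ := by
  letI : IsAntisymm Int (· < ·) := ⟨fun a b hab hba => absurd hba (lt_asymm hab)⟩
  exact ((List.perm_ext_iff_of_nodup h1.nodup h2.nodup).mpr hm).eq_of_sorted
    (fun a b _ _ hab hba => absurd hba (lt_asymm hab)) h1 h2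

-- a clamped window is a filter of the full index range

theorem pv_win_eq_filter (toks : List String) (span x : Int) :
    pvWin toks span x = (PySem.List.pyRange 0 (PySem.List.len toks) 1).filter
      (fun y => decide (x - span ≤ y) && decide (y < x + span + 1)) := by
  apply pv_eq_of_mem_iff_of_pairwise_lt
  · exact PySem.List.pairwise_lt_pyRange_one _ _
  · exact (PySem.List.pairwise_lt_pyRange_one _ _).filter _
  · intro y
    simp [pvWin, PySem.List.mem_pyRange_one, List.mem_filter]
    omega

theorem pv_filter_ofList (q : String → Bool) (l : List String) :
    (PySem.Set.ofList l).filter q = PySem.Set.ofList (l.filter q) := by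
  induction l with
  | nil => rfl
  | cons x xs ih =>
    rw [PySem.Set.ofList_cons]
    by_cases hq : q x = true
    · simp only [List.filter_cons, hq, if_true, PySem.Set.ofList_cons]
      unfold PySem.Set.discard
      rw [← ih, List.filter_filter, List.filter_filter]
      congr 1
      apply List.filter_congr
      intro y _
      rw [Bool.and_comm]
    · simp only [Bool.not_eq_true] at hq
      simp only [List.filter_cons, hq, Bool.false_eq_true, if_false]
      unfold PySem.Set.discard
      rw [← ih, List.filter_filter]
      apply List.filter_congr
      intro y _
      by_cases hy : q y = true
      · have hyx : (y == x) = false := by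
          by_cases h : y = x
          · exfalso; rw [h, hq] at hy; cases hy
          · simp [h]
        simp [hy, hyx]
      · simp only [Bool.not_eq_true] at hy
        simp [hy]

-- first-occurrence order is preserved by filtering (for members of the filtered list)

theorem pv_idxOf_filter_mono (p : String → Bool) (l : List String) (a b : String)
    (ha : a ∈ l.filter p) (hb : b ∈ l.filter p) :
    ((l.filter p).idxOf a ≤ (l.filter p).idxOf b ↔ l.idxOf a ≤ l.idxOf b) := by
  induction l with
  | nil => simp at ha
  | cons x xs ih =>
    have hpa : p a = true := (List.mem_filter.mp ha).2
    have hpb : p b = true := (List.mem_filter.mp hb).2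
    by_cases hpx : p x = true
    · rw [List.filter_cons, if_pos hpx] at ha hb ⊢
      by_cases hxa : x = a
      · subst hxa
        simp [List.idxOf_cons_self]
      · by_cases hxb : x = b
        · subst hxb
          have ha' : a ∈ xs.filter p := by
            rcases List.mem_cons.mp ha with h | h
            · exact absurd h.symm hxa
            · exact h
          rw [List.idxOf_cons_ne _ hxa, List.idxOf_cons_self,
              List.idxOf_cons_ne _ hxa, List.idxOf_cons_self]
          simp
        · have ha' : a ∈ xs.filter p := by
            rcases List.mem_cons.mp ha with h | h
            · exact absurd h.symm hxa
            · exact h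
          have hb' : b ∈ xs.filter p := by
            rcases List.mem_cons.mp hb with h | h
            · exact absurd h.symm hxb
            · exact h
          rw [List.idxOf_cons_ne _ hxa, List.idxOf_cons_ne _ hxb,
              List.idxOf_cons_ne _ hxa, List.idxOf_cons_ne _ hxb]
          rw [Nat.succ_le_succ_iff, Nat.succ_le_succ_iff]
          exact ih ha' hb'
    · simp only [Bool.not_eq_true] at hpx
      rw [List.filter_cons, hpx] at ha hb ⊢
      simp only [Bool.false_eq_true, if_false] at ha hb ⊢
      have hxa : x ≠ a := fun h => by rw [h, hpa] at hpx; cases hpx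
      have hxb : x ≠ b := fun h => by rw [h, hpb] at hpx; cases hpx
      rw [List.idxOf_cons_ne _ hxa, List.idxOf_cons_ne _ hxb, Nat.succ_le_succ_iff]
      exact ih ha hb

-- two lists with the same members and the same first-occurrence order have the same dedup

theorem pv_ofList_ext : ∀ (N : Nat) (xs ys : List String), xs.length ≤ N →
    (∀ a, a ∈ xs ↔ a ∈ ys) →
    (∀ a b, a ∈ xs → b ∈ xs → (xs.idxOf a ≤ xs.idxOf b ↔ ys.idxOf a ≤ ys.idxOf b)) →
    PySem.Set.ofList xs = PySem.Set.ofList ys := by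
  intro N
  induction N with
  | zero =>
    intro xs ys hlen hmem _
    have hxs : xs = [] := List.eq_nil_of_length_eq_zero (by omega)
    subst hxs
    have : ys = [] := by
      cases ys with
      | nil => rfl
      | cons y ys' => exact absurd ((hmem y).mpr List.mem_cons_self) (by simp)
    rw [this]
  | succ N ih =>
    intro xs ys hlen hmem hord
    cases xs with
    | nil =>
      have : ys = [] := by
        cases ys with
        | nil => rfl
        | cons y ys' => exact absurd ((hmem y).mpr List.mem_cons_self) (by simp)
      rw [this]
    | cons x xs' =>
      cases ys with
      | nil => exact absurd ((hmem x).mp List.mem_cons_self) (by simp)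
      | cons y ys' =>
        -- heads agree
        have hxy : x = y := by
          by_contra hne0
          have hne : y ≠ x := fun h => hne0 h.symm
          have hxys : x ∈ y :: ys' := (hmem x).mp List.mem_cons_self
          have hyxs : y ∈ x :: xs' := (hmem y).mpr List.mem_cons_self
          have h1 : (x :: xs').idxOf x ≤ (x :: xs').idxOf y := by
            rw [List.idxOf_cons_self]; omega
          have h2 := (hord x y List.mem_cons_self hyxs).mp h1
          rw [List.idxOf_cons_self, List.idxOf_cons_ne _ hne] at h2
          omega
        subst hxy
        rw [PySem.Set.ofList_cons, PySem.Set.ofList_cons]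
        apply congrArg
        unfold PySem.Set.discard
        rw [pv_filter_ofList, pv_filter_ofList]
        apply ih
        · have := List.length_filter_le (fun z => !(z == x)) xs'
          simp only [List.length_cons] at hlen
          omega
        · intro a
          simp only [List.mem_filter, Bool.not_eq_eq_eq_not, Bool.not_true, beq_eq_false_iff_ne]
          constructor
          · rintro ⟨haxs, hax⟩
            have : a ∈ x :: ys' := (hmem a).mp (List.mem_cons_of_mem _ haxs)
            rcases List.mem_cons.mp this with h | h
            · exact absurd h hax
            · exact ⟨h, hax⟩
          · rintro ⟨hays, hax⟩
            have : a ∈ x :: xs' := (hmem a).mpr (List.mem_cons_of_mem _ hays)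
            rcases List.mem_cons.mp this with h | h
            · exact absurd h hax
            · exact ⟨h, hax⟩
        · intro a b ha hb
          have hmem_a := List.mem_filter.mp ha
          have hmem_b := List.mem_filter.mp hb
          have hax : a ≠ x := by
            have := hmem_a.2; simpa using this
          have hbx : b ≠ x := by
            have := hmem_b.2; simpa using this
          rw [pv_idxOf_filter_mono _ _ _ _ ha hb]
          have hb' : b ∈ ys'.filter (fun z => !(z == x)) := by
            rw [List.mem_filter]
            refine ⟨?_, by simpa using hbx⟩
            have : b ∈ x :: ys' := (hmem b).mp (List.mem_cons_of_mem _ hmem_b.1)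
            rcases List.mem_cons.mp this with h | h
            · exact absurd h hbx
            · exact h
          have ha' : a ∈ ys'.filter (fun z => !(z == x)) := by
            rw [List.mem_filter]
            refine ⟨?_, by simpa using hax⟩
            have : a ∈ x :: ys' := (hmem a).mp (List.mem_cons_of_mem _ hmem_a.1)
            rcases List.mem_cons.mp this with h | h
            · exact absurd h hax
            · exact h
          rw [pv_idxOf_filter_mono _ _ _ _ ha' hb']
          have h1 := hord a b (List.mem_cons_of_mem _ hmem_a.1) (List.mem_cons_of_mem _ hmem_b.1)
          rw [List.idxOf_cons_ne _ (Ne.symm hax), List.idxOf_cons_ne _ (Ne.symm hbx),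
              List.idxOf_cons_ne _ (Ne.symm hax), List.idxOf_cons_ne _ (Ne.symm hbx)] at h1
          constructor
          · intro h
            have := h1.mp (by omega)
            omega
          · intro h
            have := h1.mpr (by omega)
            omega

-- every value attained by g on l has a ≤-least preimage in l

theorem pv_exmin {β : Type} [LinearOrder β] (l : List β) (g : β → String) (a : String)
    (ha : a ∈ l.map g) : ∃ x, x ∈ l ∧ g x = a ∧ ∀ y ∈ l, g y = a → x ≤ y := by
  induction l with
  | nil => simp at ha
  | cons z l' ih =>
    by_cases htail : a ∈ l'.map g
    · obtain ⟨x', hx'mem, hx'g, hx'min⟩ := ih htail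
      by_cases hz : g z = a
      · refine ⟨min z x', ?_, ?_, ?_⟩
        · rcases le_total z x' with h | h
          · simp [min_eq_left h]
          · simp [min_eq_right h, hx'mem]
        · rcases le_total z x' with h | h
          · rwa [min_eq_left h]
          · rwa [min_eq_right h]
        · intro y hy hgy
          rcases List.mem_cons.mp hy with h | h
          · subst h; exact min_le_left _ _
          · exact le_trans (min_le_right _ _) (hx'min y h hgy)
      · refine ⟨x', List.mem_cons_of_mem _ hx'mem, hx'g, ?_⟩
        intro y hy hgy
        rcases List.mem_cons.mp hy with h | h
        · subst h; exact absurd hgy hz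
        · exact hx'min y h hgy
    · have hz : g z = a := by
        rcases List.mem_map.mp ha with ⟨w, hw, hgw⟩
        rcases List.mem_cons.mp hw with h | h
        · rw [← h]; exact hgw
        · exact absurd (List.mem_map.mpr ⟨w, h, hgw⟩) htail
      refine ⟨z, List.mem_cons_self, hz, ?_⟩
      intro y hy hgy
      rcases List.mem_cons.mp hy with h | h
      · subst h; exact le_refl _
      · exact absurd (List.mem_map.mpr ⟨y, h, hgy⟩) htail

-- on a strictly increasing list, first-occurrence order of values = order of least preimages

theorem pv_firstmin {β : Type} [LinearOrder β] (l : List β) (hl : l.Pairwise (· < ·))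
    (g : β → String) (a b : String) (ja jb : β)
    (hja : ja ∈ l ∧ g ja = a ∧ ∀ y ∈ l, g y = a → ja ≤ y)
    (hjb : jb ∈ l ∧ g jb = b ∧ ∀ y ∈ l, g y = b → jb ≤ y) :
    ((l.map g).idxOf a ≤ (l.map g).idxOf b ↔ ja ≤ jb) := by
  induction l with
  | nil => exact absurd hja.1 (by simp)
  | cons x l' ih =>
    have hx : ∀ y ∈ l', x < y := fun y hy => List.rel_of_pairwise_cons hl hy
    have hl' : l'.Pairwise (· < ·) := hl.of_cons
    by_cases hga : g x = a
    · have hjax : ja ≤ x := hja.2.2 x List.mem_cons_self hga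
      by_cases hgb : g x = b
      · have hjbx : jb ≤ x := hjb.2.2 x List.mem_cons_self hgb
        have h1 : jb ≤ ja := by
          apply hjb.2.2 ja hja.1
          rw [hja.2.1, ← hga, hgb]
        have h2 : ja ≤ jb := by
          apply hja.2.2 jb hjb.1
          rw [hjb.2.1, ← hgb, hga]
        have hab : a = b := by rw [← hga, hgb]
        subst hab
        simp only [List.map_cons, hga, List.idxOf_cons_self]
        exact iff_of_true (le_refl _) h2
      · have hjb' : jb ∈ l' := by
          rcases List.mem_cons.mp hjb.1 with h | h
          · exact absurd (h ▸ hjb.2.1) hgb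
          · exact h
        have hxjb : x < jb := hx jb hjb'
        rw [List.map_cons, hga, List.idxOf_cons_self]
        refine iff_of_true (Nat.zero_le _) (le_of_lt (lt_of_le_of_lt hjax hxjb))
    · have hja' : ja ∈ l' := by
        rcases List.mem_cons.mp hja.1 with h | h
        · exact absurd (h ▸ hja.2.1) hga
        · exact h
      have hxja : x < ja := hx ja hja'
      by_cases hgb : g x = b
      · have hjbx : jb ≤ x := hjb.2.2 x List.mem_cons_self hgb
        have hba : b ≠ a := fun h => hga (hgb.trans h)
        rw [List.map_cons, hgb, List.idxOf_cons_self, List.idxOf_cons_ne _ hba]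
        refine iff_of_false (by omega) (not_le.mpr (lt_of_le_of_lt hjbx hxja))
      · have hjb' : jb ∈ l' := by
          rcases List.mem_cons.mp hjb.1 with h | h
          · exact absurd (h ▸ hjb.2.1) hgb
          · exact h
        rw [List.map_cons, List.idxOf_cons_ne _ hga, List.idxOf_cons_ne _ hgb]
        rw [Nat.succ_le_succ_iff]
        apply ih hl'
        · exact ⟨hja', hja.2.1, fun y hy hgy => hja.2.2 y (List.mem_cons_of_mem _ hy) hgy⟩
        · exact ⟨hjb', hjb.2.1, fun y hy hgy => hjb.2.2 y (List.mem_cons_of_mem _ hy) hgy⟩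

-- P1: the second component of the lex-least pair is the least qualifying index

theorem pv_heart_p1 (Occ Cand : Int → Prop) (s ia ja jA : Int)
    (hpair : Occ ia ∧ Cand ja ∧ ia - s ≤ ja ∧ ja ≤ ia + s)
    (hmin : ∀ i j, Occ i → Cand j → i - s ≤ j → j ≤ i + s → ia < i ∨ (ia = i ∧ ja ≤ j))
    (hq : Cand jA ∧ ∃ i, Occ i ∧ i - s ≤ jA ∧ jA ≤ i + s)
    (hqmin : ∀ j, Cand j → (∃ i, Occ i ∧ i - s ≤ j ∧ j ≤ i + s) → jA ≤ j) : ja = jA := by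
  obtain ⟨hocc, hcand, hadj1, hadj2⟩ := hpair
  obtain ⟨hcA, i0, hocc0, hady1, hady2⟩ := hq
  have h1 : jA ≤ ja := hqmin ja hcand ⟨ia, hocc, hadj1, hadj2⟩
  have h2 : ja ≤ jA := by
    by_cases hadj : ia - s ≤ jA ∧ jA ≤ ia + s
    · rcases hmin ia jA hocc hcA hadj.1 hadj.2 with h | h
      · omega
      · exact h.2
    · -- jA is outside ia's window
      by_cases hlt : jA < ia - s
      · -- then i0 < ia, contradicting lex-minimality
        rcases hmin i0 jA hocc0 hcA hady1 hady2 with h | h <;> omega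
      · -- jA > ia + s, but ja ≤ ia + s
        omega
  omega

-- strict direction: a smaller least qualifying index forces a lex-smaller least pair

theorem pv_heart_dir (Occ CandA CandB : Int → Prop) (s ia ja ib jb : Int)
    (hpa : Occ ia ∧ CandA ja ∧ ia - s ≤ ja ∧ ja ≤ ia + s)
    (hpamin : ∀ i j, Occ i → CandA j → i - s ≤ j → j ≤ i + s → ia < i ∨ (ia = i ∧ ja ≤ j))
    (hpb : Occ ib ∧ CandB jb ∧ ib - s ≤ jb ∧ jb ≤ ib + s)
    (hlt : ja < jb) : ia < ib ∨ (ia = ib ∧ ja < jb) := by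
  obtain ⟨hocca, hcanda, ha1, ha2⟩ := hpa
  obtain ⟨hoccb, hcandb, hb1, hb2⟩ := hpb
  by_contra hcon
  push_neg at hcon
  -- from ¬goal: ib < ia ∨ (ib = ia ∧ jb ≤ ja); with hlt the second is impossible, so ib < ia
  have hib : ib < ia := by
    rcases lt_or_eq_of_le hcon.1 with h | h
    · exact h
    · exact absurd (hcon.2 h.symm) (by omega)
  by_cases hadj : ib - s ≤ ja ∧ ja ≤ ib + s
  · rcases hpamin ib ja hoccb hcanda hadj.1 hadj.2 with h | h <;> omega
  · by_cases hlo : ja < ib - s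
    · -- ia is adjacent to ja and ia ≤ ja + s < ib, contradicting ib < ia
      omega
    · -- ja > ib + s ≥ jb, contradicting ja < jb
      omega

-- the lex order of least pairs coincides with the order of least qualifying indices

theorem pv_heart (Occ CandA CandB : Int → Prop) (s ia ja ib jb : Int)
    (hpa : Occ ia ∧ CandA ja ∧ ia - s ≤ ja ∧ ja ≤ ia + s)
    (hpamin : ∀ i j, Occ i → CandA j → i - s ≤ j → j ≤ i + s → ia < i ∨ (ia = i ∧ ja ≤ j))
    (hpb : Occ ib ∧ CandB jb ∧ ib - s ≤ jb ∧ jb ≤ ib + s)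
    (hpbmin : ∀ i j, Occ i → CandB j → i - s ≤ j → j ≤ i + s → ib < i ∨ (ib = i ∧ jb ≤ j)) :
    ((ia < ib ∨ (ia = ib ∧ ja ≤ jb)) ↔ ja ≤ jb) := by
  constructor
  · intro h
    by_contra hgt
    push_neg at hgt
    rcases pv_heart_dir Occ CandB CandA s ib jb ia ja hpb hpbmin hpa hgt with h' | h' <;> omega
  · intro h
    rcases lt_or_eq_of_le h with hlt | heq
    · rcases pv_heart_dir Occ CandA CandB s ia ja ib jb hpa hpamin hpb hlt with h' | h' <;> omega
    · subst heq
      rcases hpamin ib ja hpb.1 hpa.2.1 hpb.2.2.1 hpb.2.2.2 with h' | h' <;> omega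

def pvGoodP (t : String) (toks : List String) (j : Int) : Prop :=
  ¬ PySem.Str.len (pvG toks j) < 3 ∧ pvG toks j ≠ t

def pvPC (t : String) (toks : List String) (span i j : Int) : Prop :=
  0 ≤ i ∧ i < (toks.length : Int) ∧ 0 ≤ j ∧ j < (toks.length : Int) ∧ pvG toks i = t ∧
    i - span ≤ j ∧ j ≤ i + span ∧ pvGoodP t toks j

def pvPAL (t : String) (toks : List String) (span : Int) : List (Lex (Int × Int)) :=
  ((PySem.List.pyRange 0 (PySem.List.len toks) 1).filter (fun i => pvG toks i == t)).flatMap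
    (fun i => ((pvWin toks span i).filter (fun j => !(j == i) && pvGoodB t toks j)).map
      (fun j => toLex (i, j)))

def pvJB (t : String) (toks : List String) (span : Int) : List Int :=
  (PySem.List.pyRange 0 (PySem.List.len toks) 1).filter
    (fun j => pvGoodB t toks j && decide (0 < pvCnt t toks span j))

theorem pv_goodB_iff (t : String) (toks : List String) (j : Int) :
    pvGoodB t toks j = true ↔ pvGoodP t toks j := by
  unfold pvGoodB pvGoodP
  simp [not_or]

theorem pv_mem_win (toks : List String) (span i j : Int) :
    j ∈ pvWin toks span i ↔ 0 ≤ j ∧ j < (toks.length : Int) ∧ i - span ≤ j ∧ j ≤ i + span := by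
  unfold pvWin
  rw [PySem.List.mem_pyRange_one]
  simp only [PySem.List.len_eq]
  omega

theorem pv_cnt_pos (t : String) (toks : List String) (span j : Int) :
    0 < pvCnt t toks span j ↔ ∃ i, i ∈ pvWin toks span j ∧ pvG toks i = t := by
  unfold pvCnt
  rw [Int.natCast_pos, List.length_pos_iff_exists_mem]
  constructor
  · rintro ⟨i, hi⟩
    rw [List.mem_filter] at hi
    exact ⟨i, hi.1, by simpa using hi.2⟩
  · rintro ⟨i, hmem, hg⟩
    exact ⟨i, List.mem_filter.mpr ⟨hmem, by simpa using hg⟩⟩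

theorem pv_mem_PAL (t : String) (toks : List String) (span i j : Int) :
    toLex (i, j) ∈ pvPAL t toks span ↔ pvPC t toks span i j := by
  unfold pvPAL pvPC
  rw [List.mem_flatMap]
  constructor
  · rintro ⟨i', hi', hins⟩
    rw [List.mem_filter, PySem.List.mem_pyRange_one] at hi'
    rw [List.mem_map] at hins
    obtain ⟨j', hj', heq⟩ := hins
    have hii : i' = i := congrArg (fun p => (ofLex p).1) heq
    have hjj : j' = j := congrArg (fun p => (ofLex p).2) heq
    rw [List.mem_filter, pv_mem_win] at hj'
    rw [hii] at hi'
    rw [hii, hjj] at hj'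
    simp only [PySem.List.len_eq] at hi'
    have hgood := hj'.2
    simp only [Bool.and_eq_true, Bool.not_eq_true', beq_eq_false_iff_ne] at hgood
    have hgi : pvG toks i = t := by simpa using hi'.2
    obtain ⟨h0j, hjn, ha1, ha2⟩ := hj'.1
    exact ⟨hi'.1.1, hi'.1.2, h0j, hjn, hgi, ha1, ha2, (pv_goodB_iff _ _ _).mp hgood.2⟩
  · rintro ⟨h0i, hin, h0j, hjn, hgi, ha1, ha2, hgood⟩
    refine ⟨i, ?_, ?_⟩
    · rw [List.mem_filter, PySem.List.mem_pyRange_one]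
      simp only [PySem.List.len_eq]
      exact ⟨⟨h0i, hin⟩, by simpa using hgi⟩
    · rw [List.mem_map]
      refine ⟨j, ?_, rfl⟩
      rw [List.mem_filter, pv_mem_win]
      refine ⟨⟨h0j, hjn, ha1, ha2⟩, ?_⟩
      have hne : j ≠ i := by
        intro h
        rw [h] at hgood
        exact hgood.2 hgi
      simp only [Bool.and_eq_true, Bool.not_eq_true', beq_eq_false_iff_ne]
      exact ⟨hne, (pv_goodB_iff _ _ _).mpr hgood⟩

theorem pv_mem_JB (t : String) (toks : List String) (span j : Int) :
    j ∈ pvJB t toks span ↔ ∃ i, pvPC t toks span i j := by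
  unfold pvJB
  rw [List.mem_filter, PySem.List.mem_pyRange_one]
  simp only [Bool.and_eq_true, decide_eq_true_eq, PySem.List.len_eq]
  constructor
  · rintro ⟨⟨h0, hn⟩, hgood, hcnt⟩
    obtain ⟨i, hiw, hgi⟩ := (pv_cnt_pos t toks span j).mp hcnt
    rw [pv_mem_win] at hiw
    exact ⟨i, hiw.1, hiw.2.1, h0, hn, hgi, by omega, by omega, (pv_goodB_iff _ _ _).mp hgood⟩
  · rintro ⟨i, h0i, hin, h0j, hjn, hgi, ha1, ha2, hgood⟩
    refine ⟨⟨h0j, hjn⟩, (pv_goodB_iff _ _ _).mpr hgood, ?_⟩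
    rw [pv_cnt_pos]
    exact ⟨i, (pv_mem_win toks span j i).mpr ⟨h0i, hin, by omega, by omega⟩, hgi⟩

theorem pv_EA_eq (t : String) (toks : List String) (span : Int) :
    pvEA t toks span = (pvPAL t toks span).map (fun p => pvG toks (ofLex p).2) := by
  unfold pvEA pvPAL
  rw [List.map_flatMap]
  congr 1
  funext i
  rw [List.map_map]
  rfl

theorem pv_ys_eq (t : String) (toks : List String) (span : Int) :
    (pvEB t toks span).map Prod.fst = (pvJB t toks span).map (pvG toks) := by
  unfold pvEB pvJB
  rw [List.map_map]
  rfl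

theorem pv_mem_EA (t : String) (toks : List String) (span : Int) (a : String) :
    a ∈ pvEA t toks span ↔ ∃ i j, pvPC t toks span i j ∧ pvG toks j = a := by
  rw [pv_EA_eq, List.mem_map]
  constructor
  · rintro ⟨p, hp, hval⟩
    refine ⟨(ofLex p).1, (ofLex p).2, ?_, hval⟩
    rw [← pv_mem_PAL]
    simpa using hp
  · rintro ⟨i, j, hpc, hval⟩
    exact ⟨toLex (i, j), (pv_mem_PAL t toks span i j).mpr hpc, hval⟩

theorem pv_mem_ys (t : String) (toks : List String) (span : Int) (a : String) :
    a ∈ (pvEB t toks span).map Prod.fst ↔ ∃ i j, pvPC t toks span i j ∧ pvG toks j = a := by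
  rw [pv_ys_eq, List.mem_map]
  constructor
  · rintro ⟨j, hj, hval⟩
    obtain ⟨i, hpc⟩ := (pv_mem_JB t toks span j).mp hj
    exact ⟨i, j, hpc, hval⟩
  · rintro ⟨i, j, hpc, hval⟩
    exact ⟨j, (pv_mem_JB t toks span j).mpr ⟨i, hpc⟩, hval⟩

theorem pv_JB_pairwise (t : String) (toks : List String) (span : Int) :
    (pvJB t toks span).Pairwise (· < ·) :=
  (PySem.List.pairwise_lt_pyRange_one _ _).filter _

theorem pv_PAL_pairwise (t : String) (toks : List String) (span : Int) :
    (pvPAL t toks span).Pairwise (· < ·) := by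
  unfold pvPAL
  rw [List.pairwise_flatMap]
  constructor
  · intro i _
    apply List.Pairwise.map
    · intro j1 j2 h12
      rw [Prod.Lex.lt_iff]
      right
      exact ⟨rfl, h12⟩
    · exact ((PySem.List.pairwise_lt_pyRange_one _ _).filter _ : _)
  · apply List.Pairwise.filter
    apply (PySem.List.pairwise_lt_pyRange_one _ _).imp_of_mem
    intro i1 i2 _ _ h12 p1 hp1 p2 hp2
    rw [List.mem_map] at hp1 hp2
    obtain ⟨j1, _, hj1⟩ := hp1
    obtain ⟨j2, _, hj2⟩ := hp2
    subst hj1; subst hj2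
    rw [Prod.Lex.lt_iff]
    left
    simpa using h12

-- first-occurrence order agrees between the pair enumeration and the index enumeration

theorem pv_hord (t : String) (toks : List String) (span : Int) (a b : String)
    (ha : a ∈ pvEA t toks span) (hb : b ∈ pvEA t toks span) :
    ((pvEA t toks span).idxOf a ≤ (pvEA t toks span).idxOf b
      ↔ ((pvEB t toks span).map Prod.fst).idxOf a ≤ ((pvEB t toks span).map Prod.fst).idxOf b) := by
  have hamem := (pv_mem_EA t toks span a).mp ha
  have hbmem := (pv_mem_EA t toks span b).mp hb
  have haJ : a ∈ (pvJB t toks span).map (pvG toks) := by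
    rw [← pv_ys_eq, pv_mem_ys]; exact hamem
  have hbJ : b ∈ (pvJB t toks span).map (pvG toks) := by
    rw [← pv_ys_eq, pv_mem_ys]; exact hbmem
  have haP : a ∈ (pvPAL t toks span).map (fun p => pvG toks (ofLex p).2) := by
    rw [← pv_EA_eq]; exact ha
  have hbP : b ∈ (pvPAL t toks span).map (fun p => pvG toks (ofLex p).2) := by
    rw [← pv_EA_eq]; exact hb
  obtain ⟨pa, hpaMem, hpaVal, hpaMin⟩ := pv_exmin _ _ a haP
  obtain ⟨pb, hpbMem, hpbVal, hpbMin⟩ := pv_exmin _ _ b hbP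
  obtain ⟨jA, hjAMem, hjAVal, hjAMin⟩ := pv_exmin _ _ a haJ
  obtain ⟨jB, hjBMem, hjBVal, hjBMin⟩ := pv_exmin _ _ b hbJ
  -- translate list minimality into the heart's predicates
  have hpaPC : pvPC t toks span (ofLex pa).1 (ofLex pa).2 := by
    rw [← pv_mem_PAL]
    simpa using hpaMem
  have hpbPC : pvPC t toks span (ofLex pb).1 (ofLex pb).2 := by
    rw [← pv_mem_PAL]
    simpa using hpbMem
  have hpaMin' : ∀ i j, pvPC t toks span i j → pvG toks j = a →
      ((ofLex pa).1 < i ∨ ((ofLex pa).1 = i ∧ (ofLex pa).2 ≤ j)) := by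
    intro i j hpc hval
    have := hpaMin (toLex (i, j)) ((pv_mem_PAL t toks span i j).mpr hpc) hval
    rwa [Prod.Lex.le_iff] at this
  have hpbMin' : ∀ i j, pvPC t toks span i j → pvG toks j = b →
      ((ofLex pb).1 < i ∨ ((ofLex pb).1 = i ∧ (ofLex pb).2 ≤ j)) := by
    intro i j hpc hval
    have := hpbMin (toLex (i, j)) ((pv_mem_PAL t toks span i j).mpr hpc) hval
    rwa [Prod.Lex.le_iff] at this
  have hjAq : ∃ i, pvPC t toks span i jA := (pv_mem_JB t toks span jA).mp hjAMem
  have hjBq : ∃ i, pvPC t toks span i jB := (pv_mem_JB t toks span jB).mp hjBMem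
  have hjAMin' : ∀ j, (∃ i, pvPC t toks span i j) → pvG toks j = a → jA ≤ j := by
    intro j hpc hval
    exact hjAMin j ((pv_mem_JB t toks span j).mpr hpc) hval
  have hjBMin' : ∀ j, (∃ i, pvPC t toks span i j) → pvG toks j = b → jB ≤ j := by
    intro j hpc hval
    exact hjBMin j ((pv_mem_JB t toks span j).mpr hpc) hval
  -- the heart, with Occ/Cand instantiated
  set n : Int := (toks.length : Int) with hn
  have hOccA : ∀ (i j : Int), (pvPC t toks span i j ∧ pvG toks j = a) ↔
      ((0 ≤ i ∧ i < n ∧ pvG toks i = t) ∧ (0 ≤ j ∧ j < n ∧ pvGoodP t toks j ∧ pvG toks j = a)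
        ∧ i - span ≤ j ∧ j ≤ i + span) := by
    intro i j
    unfold pvPC
    constructor
    · rintro ⟨⟨h1, h2, h3, h4, h5, h6, h7, h8⟩, h9⟩
      exact ⟨⟨h1, h2, h5⟩, ⟨h3, h4, h8, h9⟩, h6, h7⟩
    · rintro ⟨⟨h1, h2, h5⟩, ⟨h3, h4, h8, h9⟩, h6, h7⟩
      exact ⟨⟨h1, h2, h3, h4, h5, h6, h7, h8⟩, h9⟩
  have hOccB : ∀ (i j : Int), (pvPC t toks span i j ∧ pvG toks j = b) ↔
      ((0 ≤ i ∧ i < n ∧ pvG toks i = t) ∧ (0 ≤ j ∧ j < n ∧ pvGoodP t toks j ∧ pvG toks j = b)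
        ∧ i - span ≤ j ∧ j ≤ i + span) := by
    intro i j
    unfold pvPC
    constructor
    · rintro ⟨⟨h1, h2, h3, h4, h5, h6, h7, h8⟩, h9⟩
      exact ⟨⟨h1, h2, h5⟩, ⟨h3, h4, h8, h9⟩, h6, h7⟩
    · rintro ⟨⟨h1, h2, h5⟩, ⟨h3, h4, h8, h9⟩, h6, h7⟩
      exact ⟨⟨h1, h2, h3, h4, h5, h6, h7, h8⟩, h9⟩
  -- identify the second components with the least qualifying indices
  have hp1a : (ofLex pa).2 = jA := by
    refine pv_heart_p1 (fun i => 0 ≤ i ∧ i < n ∧ pvG toks i = t)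
      (fun j => 0 ≤ j ∧ j < n ∧ pvGoodP t toks j ∧ pvG toks j = a) span (ofLex pa).1 _ _
      ((hOccA _ _).mp ⟨hpaPC, hpaVal⟩) ?_ ?_ ?_
    · intro i j hOi hCj h1 h2
      exact hpaMin' i j ((hOccA i j).mpr ⟨hOi, hCj, h1, h2⟩).1 ((hOccA i j).mpr ⟨hOi, hCj, h1, h2⟩).2
    · obtain ⟨i0, hpc0⟩ := hjAq
      have h := (hOccA i0 jA).mp ⟨hpc0, hjAVal⟩
      exact ⟨h.2.1, i0, h.1, h.2.2⟩
    · intro j hCj ⟨i, hOi, h1, h2⟩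
      exact hjAMin' j ⟨i, ((hOccA i j).mpr ⟨hOi, hCj, h1, h2⟩).1⟩ hCj.2.2.2
  have hp1b : (ofLex pb).2 = jB := by
    refine pv_heart_p1 (fun i => 0 ≤ i ∧ i < n ∧ pvG toks i = t)
      (fun j => 0 ≤ j ∧ j < n ∧ pvGoodP t toks j ∧ pvG toks j = b) span (ofLex pb).1 _ _
      ((hOccB _ _).mp ⟨hpbPC, hpbVal⟩) ?_ ?_ ?_
    · intro i j hOi hCj h1 h2
      exact hpbMin' i j ((hOccB i j).mpr ⟨hOi, hCj, h1, h2⟩).1 ((hOccB i j).mpr ⟨hOi, hCj, h1, h2⟩).2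
    · obtain ⟨i0, hpc0⟩ := hjBq
      have h := (hOccB i0 jB).mp ⟨hpc0, hjBVal⟩
      exact ⟨h.2.1, i0, h.1, h.2.2⟩
    · intro j hCj ⟨i, hOi, h1, h2⟩
      exact hjBMin' j ⟨i, ((hOccB i j).mpr ⟨hOi, hCj, h1, h2⟩).1⟩ hCj.2.2.2
  -- the heart
  have hheart : (((ofLex pa).1 < (ofLex pb).1 ∨ ((ofLex pa).1 = (ofLex pb).1 ∧ jA ≤ jB)) ↔ jA ≤ jB) := by
    refine pv_heart (fun i => 0 ≤ i ∧ i < n ∧ pvG toks i = t)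
      (fun j => 0 ≤ j ∧ j < n ∧ pvGoodP t toks j ∧ pvG toks j = a)
      (fun j => 0 ≤ j ∧ j < n ∧ pvGoodP t toks j ∧ pvG toks j = b)
      span (ofLex pa).1 jA (ofLex pb).1 jB ?_ ?_ ?_ ?_
    · rw [← hp1a]; exact (hOccA _ _).mp ⟨hpaPC, hpaVal⟩
    · intro i j hOi hCj h1 h2
      rw [← hp1a]
      exact hpaMin' i j ((hOccA i j).mpr ⟨hOi, hCj, h1, h2⟩).1 ((hOccA i j).mpr ⟨hOi, hCj, h1, h2⟩).2
    · rw [← hp1b]; exact (hOccB _ _).mp ⟨hpbPC, hpbVal⟩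
    · intro i j hOi hCj h1 h2
      rw [← hp1b]
      exact hpbMin' i j ((hOccB i j).mpr ⟨hOi, hCj, h1, h2⟩).1 ((hOccB i j).mpr ⟨hOi, hCj, h1, h2⟩).2
  -- chain the three equivalences
  rw [pv_EA_eq, pv_ys_eq]
  rw [pv_firstmin (pvPAL t toks span) (pv_PAL_pairwise t toks span) _ a b pa pb
      ⟨hpaMem, hpaVal, hpaMin⟩ ⟨hpbMem, hpbVal, hpbMin⟩]
  rw [pv_firstmin (pvJB t toks span) (pv_JB_pairwise t toks span) _ a b jA jB
      ⟨hjAMem, hjAVal, hjAMin⟩ ⟨hjBMem, hjBVal, hjBMin⟩]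
  rw [Prod.Lex.le_iff, hp1a, hp1b]
  exact hheart

theorem pv_keys_eq (t : String) (toks : List String) (span : Int) :
    PySem.Set.ofList (pvEA t toks span)
      = PySem.Set.ofList ((pvEB t toks span).map Prod.fst) := by
  apply pv_ofList_ext (pvEA t toks span).length _ _ le_rfl
  · intro a; rw [pv_mem_EA, pv_mem_ys]
  · exact pv_hord t toks span

theorem pv_count_map (l : List Int) (g : Int → String) (k : String) :
    (l.map g).count k = (l.filter (fun j => g j == k)).length := by
  induction l with
  | nil => rfl
  | cons x xs ih =>
    rw [List.map_cons, List.count_cons, ih, List.filter_cons]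
    by_cases h : g x = k
    · simp [h]
    · simp [h, Ne.symm h]

theorem pv_count_A (t : String) (toks : List String) (span : Int) (k : String) :
    ((pvEA t toks span).count k : Int)
      = ((PySem.List.pyRange 0 (PySem.List.len toks) 1).map
          (fun i => (((PySem.List.pyRange 0 (PySem.List.len toks) 1).filter
            (fun j => (pvG toks i == t) && ((decide (i - span ≤ j) && decide (j < i + span + 1))
              && ((!(j == i) && pvGoodB t toks j) && (pvG toks j == k))))).length : Int))).sum := by
  unfold pvEA
  rw [List.count_flatMap]
  rw [Nat.cast_list_sum, List.map_map]
  rw [pv_sum_filter_ite]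
  apply congrArg
  apply List.map_congr_left
  intro i _
  by_cases hi : (pvG toks i == t) = true
  · rw [if_pos hi]
    simp only [Function.comp]
    rw [pv_count_map, List.filter_filter, pv_win_eq_filter, List.filter_filter]
    apply congrArg Nat.cast
    apply congrArg List.length
    apply List.filter_congr
    intro j _
    rw [hi]
    simp only [Bool.true_and]
    ac_rfl
  · rw [if_neg hi]
    simp only [Bool.not_eq_true] at hi
    rw [show ((PySem.List.pyRange 0 (PySem.List.len toks) 1).filter
        (fun j => (pvG toks i == t) && ((decide (i - span ≤ j) && decide (j < i + span + 1))
          && ((!(j == i) && pvGoodB t toks j) && (pvG toks j == k))))) = [] from ?_]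
    · rfl
    · rw [List.filter_eq_nil_iff]
      intro j _
      rw [hi]
      simp

theorem pv_count_B (t : String) (toks : List String) (span : Int) (k : String) :
    (((pvEB t toks span).filter (fun p => p.1 == k)).map (·.2)).sum
      = ((PySem.List.pyRange 0 (PySem.List.len toks) 1).map
          (fun j => (((PySem.List.pyRange 0 (PySem.List.len toks) 1).filter
            (fun i => (pvGoodB t toks j && (pvG toks j == k))
              && ((decide (j - span ≤ i) && decide (i < j + span + 1)) && (pvG toks i == t)))).length : Int))).sum := by
  unfold pvEB
  rw [List.filter_map, List.map_map, List.filter_filter]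
  have hstep1 : (PySem.List.pyRange 0 (PySem.List.len toks) 1).filter
        (fun j => ((fun p => p.1 == k) ∘ fun j => (pvG toks j, pvCnt t toks span j)) j
          && (pvGoodB t toks j && decide (0 < pvCnt t toks span j)))
      = (PySem.List.pyRange 0 (PySem.List.len toks) 1).filter
        (fun j => (pvGoodB t toks j && (pvG toks j == k)) && decide (0 < pvCnt t toks span j)) := by
    apply List.filter_congr
    intro j _
    simp only [Function.comp]
    ac_rfl
  rw [hstep1]
  have hstep2 : (((PySem.List.pyRange 0 (PySem.List.len toks) 1).filter
        (fun j => (pvGoodB t toks j && (pvG toks j == k)) && decide (0 < pvCnt t toks span j))).map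
          ((fun p => p.2) ∘ fun j => (pvG toks j, pvCnt t toks span j))).sum
      = (((PySem.List.pyRange 0 (PySem.List.len toks) 1).filter
          (fun j => pvGoodB t toks j && (pvG toks j == k))).map (fun j => pvCnt t toks span j)).sum := by
    exact pv_sum_filter_pos _ _ _ (fun j _ h => by simp only [Function.comp] at h ⊢; unfold pvCnt at h ⊢; omega)
  rw [hstep2, pv_sum_filter_ite]
  apply congrArg
  apply List.map_congr_left
  intro j _
  by_cases hj : (pvGoodB t toks j && (pvG toks j == k)) = true
  · rw [if_pos hj]
    unfold pvCnt
    rw [pv_win_eq_filter, List.filter_filter]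
    apply congrArg Nat.cast
    apply congrArg List.length
    apply List.filter_congr
    intro i _
    rw [hj]
    simp only [Bool.true_and]
    ac_rfl
  · rw [if_neg hj]
    simp only [Bool.not_eq_true] at hj
    rw [show ((PySem.List.pyRange 0 (PySem.List.len toks) 1).filter
        (fun i => (pvGoodB t toks j && (pvG toks j == k))
          && ((decide (j - span ≤ i) && decide (i < j + span + 1)) && (pvG toks i == t)))) = [] from ?_]
    · rfl
    · rw [List.filter_eq_nil_iff]
      intro i _
      rw [hj]
      simp

theorem pv_count_eq (t : String) (toks : List String) (span : Int) (k : String) :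
    ((pvEA t toks span).count k : Int)
      = (((pvEB t toks span).filter (fun p => p.1 == k)).map (·.2)).sum := by
  rw [pv_count_A, pv_count_B, pv_countswap]
  apply congrArg
  apply List.map_congr_left
  intro j hj
  apply congrArg Nat.cast
  apply congrArg List.length
  apply List.filter_congr
  intro i hi
  rw [PySem.List.mem_pyRange_one] at hi hj
  apply Bool.eq_iff_iff.mpr
  simp only [Bool.and_eq_true, decide_eq_true_eq, Bool.not_eq_true', beq_eq_false_iff_ne, beq_iff_eq]
  constructor
  · rintro ⟨hgt, ⟨hb1, hb2⟩, ⟨hne, hgood⟩, hgk⟩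
    exact ⟨⟨hgood, hgk⟩, ⟨by omega, by omega⟩, hgt⟩
  · rintro ⟨⟨hgood, hgk⟩, ⟨hb1, hb2⟩, hgt⟩
    have hne : i ≠ j := by
      intro h
      rw [pv_goodB_iff] at hgood
      exact hgood.2 (h ▸ hgt)
    exact ⟨hgt, ⟨by omega, by omega⟩, ⟨Ne.symm hne, hgood⟩, hgk⟩

theorem pv_foldl_if_fold {γ : Type} (l : List γ) (c : γ → Bool) (h : γ → List String)
    (init : PySem.Dict String Int) :
    l.foldl (fun d i => if c i then (h i).foldl (fun d x => d.modify x 0 (· + 1)) d else d) init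
      = ((l.filter c).flatMap h).foldl (fun d x => d.modify x 0 (· + 1)) init := by
  induction l generalizing init with
  | nil => rfl
  | cons x xs ih =>
    rw [List.foldl_cons, List.filter_cons]
    by_cases hc : c x = true
    · rw [if_pos hc, if_pos hc, List.flatMap_cons, List.foldl_append, ih]
    · rw [if_neg (by simp [hc]), if_neg (by simp [hc]), ih]

theorem pv_foldl_if_modify1 (l : List Int) (c : Int → Bool) (key : Int → String)
    (init : PySem.Dict String Int) :
    l.foldl (fun d j => if c j then d.modify (key j) 0 (· + 1) else d) init
      = ((l.filter c).map key).foldl (fun d x => d.modify x 0 (· + 1)) init := by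
  induction l generalizing init with
  | nil => rfl
  | cons x xs ih =>
    rw [List.foldl_cons, List.filter_cons]
    by_cases hc : c x = true
    · rw [if_pos hc, if_pos hc, List.map_cons, List.foldl_cons, ih]
    · rw [if_neg (by simp [hc]), if_neg (by simp [hc]), ih]

theorem pv_dictA (t : String) (toks : List String) (span : Int) :
    (List.foldl
      (fun out p =>
        if p.2 ≠ t then out
        else
          List.foldl
            (fun out j =>
              if j = p.1 then out
              else
                if PySem.Str.len (PySem.List.pyGetD toks j "") < 3 ∨ PySem.List.pyGetD toks j "" = t then out
                else out.modify (PySem.List.pyGetD toks j "") 0 fun x => x + 1)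
            out (PySem.List.pyRange (max 0 (p.1 - span)) (min (PySem.List.len toks) (p.1 + span + 1))))
      (PySem.Dict.empty : PySem.Dict String Int) (PySem.List.enumerate toks))
    = (pvEA t toks span).foldl (fun d x => d.modify x 0 (· + 1)) PySem.Dict.empty := by
  rw [PySem.List.enumerate_eq_map_pyRange toks "", List.foldl_map]
  rw [PySem.List.foldl_congr_mem _ _
    (fun out i => if pvG toks i == t
      then (((pvWin toks span i).filter (fun j => !(j == i) && pvGoodB t toks j)).map (pvG toks)).foldl
        (fun d x => d.modify x 0 (· + 1)) out
      else out) _ ?_]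
  · rw [pv_foldl_if_fold]
    unfold pvEA
    rfl
  · intro acc i _
    simp only []
    by_cases hgi : PySem.List.pyGetD toks i "" = t
    · rw [if_neg (show ¬(PySem.List.pyGetD toks i "" ≠ t) from by simp [hgi]),
        if_pos (show (pvG toks i == t) = true from by simp [pvG, hgi])]
      rw [PySem.List.foldl_congr_mem _ _
        (fun out j => if !(j == i) && pvGoodB t toks j
          then out.modify (pvG toks j) 0 (· + 1) else out) _ ?_]
      · rw [pv_foldl_if_modify1]
        rfl
      · intro acc' j _
        simp only []
        by_cases hji : j = i
        · rw [if_pos hji, if_neg (by simp [hji])]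
        · rw [if_neg hji]
          by_cases hbad : PySem.Str.len (PySem.List.pyGetD toks j "") < 3 ∨ PySem.List.pyGetD toks j "" = t
          · rw [if_pos hbad]
            have hgb : pvGoodB t toks j = false := by
              rw [← Bool.not_eq_true, pv_goodB_iff]
              unfold pvGoodP pvG
              rintro ⟨hge, hne⟩
              rcases hbad with h | h
              · exact hge h
              · exact hne h
            rw [if_neg (by simp [hgb])]
          · rw [if_neg hbad]
            push_neg at hbad
            have hgb : pvGoodB t toks j = true := by
              rw [pv_goodB_iff]
              unfold pvGoodP pvG
              exact ⟨by omega, hbad.2⟩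
            rw [if_pos (by simp [hgb, hji] : (!(j == i) && pvGoodB t toks j) = true)]
            rfl
    · rw [if_pos (show PySem.List.pyGetD toks i "" ≠ t from hgi),
        if_neg (show ¬((pvG toks i == t) = true) from by simp [pvG, hgi])]

-- ===== B-side lemmas: the staged lists of port B are the canonical pvEB =====

-- a filterMap that keeps x itself under a test is a filter

theorem pv_filterMap_keep {α : Type} (l : List α) (c : α → Bool) :
    l.filterMap (fun x => if c x then some x else none) = l.filter c := by
  induction l with
  | nil => rfl
  | cons x xs ih =>
    by_cases hc : c x = true
    · simp [List.filterMap_cons, hc, ih]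
    · simp only [Bool.not_eq_true] at hc
      simp [List.filterMap_cons, hc, ih]

-- a filterMap that maps under a test is filter-then-map

theorem pv_filterMap_if_map {α β : Type} (l : List α) (c : α → Bool) (f : α → β) :
    l.filterMap (fun x => if c x then some (f x) else none) = (l.filter c).map f := by
  induction l with
  | nil => rfl
  | cons x xs ih =>
    by_cases hc : c x = true
    · simp [List.filterMap_cons, List.filter_cons, hc, ih]
    · simp only [Bool.not_eq_true] at hc
      simp [List.filterMap_cons, List.filter_cons, hc, ih]

-- B's occurrence list is the filtered index range

theorem pv_occ_eq (t : String) (toks : List String) :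
    ((PySem.List.enumerate toks).filterMap (fun p => if p.2 = t then some p.1 else none))
      = (PySem.List.pyRange 0 (PySem.List.len toks) 1).filter (fun i => pvG toks i == t) := by
  rw [PySem.List.enumerate_eq_map_pyRange toks "", List.filterMap_map]
  have : ((fun p : Int × String => if p.2 = t then some p.1 else none)
        ∘ fun j => (j, PySem.List.pyGetD toks j ""))
      = fun j => if (pvG toks j == t) = true then some j else none := by
    funext j
    simp only [Function.comp, pvG]
    by_cases h : PySem.List.pyGetD toks j "" = t
    · simp [h]
    · simp [h]
  rw [this, pv_filterMap_keep]

-- B's per-candidate count over the occurrence list is pvCnt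

theorem pv_cntB_eq (t : String) (toks : List String) (span j : Int) :
    ((((PySem.List.pyRange 0 (PySem.List.len toks) 1).filter (fun i => pvG toks i == t)).filter
        (fun i => decide (j - span ≤ i) && decide (i ≤ j + span))).length : Int)
      = pvCnt t toks span j := by
  unfold pvCnt
  rw [pv_win_eq_filter, List.filter_filter, List.filter_filter]
  apply congrArg Nat.cast
  apply congrArg List.length
  apply List.filter_congr
  intro i _
  apply Bool.eq_iff_iff.mpr
  simp only [Bool.and_eq_true, decide_eq_true_eq]
  constructor
  · rintro ⟨⟨h1, h2⟩, h3⟩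
    exact ⟨h3, h1, by omega⟩
  · rintro ⟨h3, h1, h2⟩
    exact ⟨⟨h1, by omega⟩, h3⟩

-- B's pair list, restricted to nonzero counts, is pvEB

theorem pv_foldl_skip_zero (l : List (String × Int)) (init : PySem.Dict String Int) :
    l.foldl (fun d q => if q.2 ≠ 0 then d.modify q.1 0 (· + q.2) else d) init
      = (l.filter (fun q => decide (q.2 ≠ 0))).foldl (fun d q => d.modify q.1 0 (· + q.2)) init := by
  induction l generalizing init with
  | nil => rfl
  | cons x xs ih =>
    rw [List.foldl_cons, List.filter_cons]
    by_cases hx : x.2 ≠ 0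
    · rw [if_pos hx, if_pos (by simpa using hx), List.foldl_cons, ih]
    · rw [if_neg hx, if_neg (by simpa using hx), ih]

theorem pv_dictB (t : String) (toks : List String) (span : Int) :
    (((PySem.List.enumerate toks).filterMap
        (fun p =>
          if 3 ≤ PySem.Str.len p.2 ∧ p.2 ≠ t then
            some (p.2, ((((PySem.List.enumerate toks).filterMap
                (fun q => if q.2 = t then some q.1 else none)).filter
              (fun i => decide (p.1 - span ≤ i) && decide (i ≤ p.1 + span))).length : Int))
          else none)).foldl
      (fun out q => if q.2 ≠ 0 then out.modify q.1 0 (· + q.2) else out)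
      (PySem.Dict.empty : PySem.Dict String Int))
    = (pvEB t toks span).foldl (fun d p => d.modify p.1 0 (· + p.2)) PySem.Dict.empty := by
  rw [pv_occ_eq]
  rw [PySem.List.enumerate_eq_map_pyRange toks "", List.filterMap_map]
  have hfun : ((fun p : Int × String =>
        if 3 ≤ PySem.Str.len p.2 ∧ p.2 ≠ t then
          some (p.2, ((((PySem.List.pyRange 0 (PySem.List.len toks) 1).filter
              (fun i => pvG toks i == t)).filter
            (fun i => decide (p.1 - span ≤ i) && decide (i ≤ p.1 + span))).length : Int))
        else none)
        ∘ fun j => (j, PySem.List.pyGetD toks j ""))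
      = fun j => if pvGoodB t toks j
          then some (pvG toks j, pvCnt t toks span j) else none := by
    funext j
    simp only [Function.comp]
    by_cases h : 3 ≤ PySem.Str.len (PySem.List.pyGetD toks j "") ∧ PySem.List.pyGetD toks j "" ≠ t
    · have hgb : pvGoodB t toks j = true := by
        rw [pv_goodB_iff]
        unfold pvGoodP pvG
        exact ⟨by omega, h.2⟩
      rw [if_pos h, hgb, if_pos rfl, pv_cntB_eq]
      rfl
    · have hgb : pvGoodB t toks j = false := by
        rw [← Bool.not_eq_true, pv_goodB_iff]
        unfold pvGoodP pvG
        rintro ⟨hge, hne⟩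
        exact h ⟨by omega, hne⟩
      rw [if_neg h, hgb]
      simp
  rw [hfun, pv_filterMap_if_map, pv_foldl_skip_zero, List.filter_map, List.filter_filter]
  unfold pvEB
  have hflt : (PySem.List.pyRange 0 (PySem.List.len toks) 1).filter
        (fun a => ((fun q : String × Int => decide (q.2 ≠ 0))
            ∘ fun j => (pvG toks j, pvCnt t toks span j)) a && pvGoodB t toks a)
      = (PySem.List.pyRange 0 (PySem.List.len toks) 1).filter
        (fun j => pvGoodB t toks j && decide (0 < pvCnt t toks span j)) := by
    apply List.filter_congr
    intro j _
    apply Bool.eq_iff_iff.mpr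
    simp only [Function.comp, Bool.and_eq_true, decide_eq_true_eq]
    have hnn : 0 ≤ pvCnt t toks span j := by unfold pvCnt; positivity
    constructor
    · rintro ⟨hg, hc⟩
      exact ⟨hc, by omega⟩
    · rintro ⟨hc, hg⟩
      exact ⟨by omega, hc⟩
  rw [hflt]

theorem pv_items (t : String) (toks : List String) (span : Int) :
    ((pvEA t toks span).foldl (fun d x => d.modify x 0 (· + 1)) PySem.Dict.empty).items
      = ((pvEB t toks span).foldl (fun d p => d.modify p.1 0 (· + p.2)) PySem.Dict.empty).items := by
  have hkA : ((pvEA t toks span).foldl (fun d x => d.modify x 0 (· + 1))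
      (PySem.Dict.empty : PySem.Dict String Int)).keys = PySem.Set.ofList (pvEA t toks span) := by
    rw [PySem.Dict.keys_foldl_modify,
      show (PySem.Dict.empty : PySem.Dict String Int).keys = [] from rfl,
      PySem.Set.update_nil_left]
  have hkB : ((pvEB t toks span).foldl (fun d p => d.modify p.1 0 (· + p.2))
      (PySem.Dict.empty : PySem.Dict String Int)).keys
        = PySem.Set.ofList ((pvEB t toks span).map Prod.fst) := by
    rw [PySem.Dict.keys_foldl_modify_key,
      show (PySem.Dict.empty : PySem.Dict String Int).keys = [] from rfl,
      PySem.Set.update_nil_left]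
  rw [PySem.Dict.items_eq_map_keys _ (by rw [hkA]; exact PySem.Set.nodup_ofList _) 0,
      PySem.Dict.items_eq_map_keys _ (by rw [hkB]; exact PySem.Set.nodup_ofList _) 0,
      hkA, hkB, pv_keys_eq]
  apply List.map_congr_left
  intro k _
  congr 1
  rw [PySem.Dict.getD_foldl_modify_add_one, pv_getD_foldl_modify_amount]
  simpa [PySem.Dict.getD_empty] using pv_count_eq t toks span k

set_option maxHeartbeats 1000000 in
theorem pv_main (term : String) (toks : List String) (span : Int) :
    co_terms_py term toks span = co_terms_py_alt term toks span := by
  unfold co_terms_py co_terms_py_alt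
  simp only []
  split_ifs with h1 h2 h3 h4 h5
  · rfl
  · exact (h2 (h1.imp id Or.inl)).elim
  · rfl
  · exact (h4 (Or.inr (Or.inr h3))).elim
  · rcases h5 with h | h | h
    · exact (h1 (Or.inl h)).elim
    · exact (h1 (Or.inr h)).elim
    · exact (h3 h).elim
  · rw [pv_dictA (PySem.Str.strip (PySem.Str.lower term)) toks span,
        pv_dictB (PySem.Str.strip (PySem.Str.lower term)) toks span]
    exact pv_items _ toks span

-- ===== VERDICT (by name: the statement is the Claim_ definition above) =====
theorem co_terms_py_spec : Claim_equal_co_terms_py := by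
  intro term tokens span _
  unfold Spec_co_terms_py
  exact pv_main term tokens span
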